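-- pv_equiv track=rewrite | github.com/NecroMancer2568/Pharma_Geno-AI | backend/services/annotation.py | determine_metabolizer_status
-- ===== SOURCE A (Python) =====
-- STAR_ALLELE_MAP = {
--     "CYP2D6": {
--         "rs3892097": {"allele": "*4", "function": "No function"},
--         "rs35742686": {"allele": "*3", "function": "No function"},
--         "rs5030655": {"allele": "*6", "function": "No function"}
--     },
--     "CYP2C19": {
--         "rs4244285": {"allele": "*2", "function": "No function"},
--         "rs4986893": {"allele": "*3", "function": "No function"},
--         "rs12248560": {"allele": "*17", "function": "Increased function"}
--     },
--     "CYP2C9": {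
--         "rs1799853": {"allele": "*2", "function": "Decreased function"},
--         "rs1057910": {"allele": "*3", "function": "No function"}
--     },
--     "DPYD": {
--         "rs3918290": {"allele": "*2A", "function": "No function"},
--         "rs67376798": {"allele": "c.2846A>T", "function": "Decreased function"}
--     },
--     "SLCO1B1": {
--         "rs4149056": {"allele": "*5", "function": "Decreased function"}
--     },
--     "VKORC1": {
--         "rs9923231": {"allele": "-1639G>A", "function": "Decreased warfarin dose requirement"}
--     },
--     "UGT1A1": {
--         "rs3064744": {"allele": "*28", "function": "Decreased function"}
--     },
--     "HLA-B": {
--         # Using a mock rsID for HLA-B*57:01 as HLA typing is complex in VCF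
--         "rs2395029": {"allele": "*57:01", "function": "Abacavir hypersensitivity"}
--     },
--     # Other genes will default to Normal Metabolizer if no target variant is found
--     "CYP3A4": {},
--     "CYP3A5": {},
--     "TPMT": {},
--     "NUDT15": {},
--     "G6PD": {}
-- }
--
-- def determine_metabolizer_status(variants: list) -> dict:
--     """
--     Assigns a metabolizer status for all 13 pharmacogenes based on variants.
--     """
--     # Initialize all genes to Normal Metabolizer
--     status_map = {gene: "Normal Metabolizer" for gene in STAR_ALLELE_MAP.keys()}
--
--     # Identify alleles present
--     found_alleles = {gene: [] for gene in STAR_ALLELE_MAP.keys()}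
--
--     for v in variants:
--         rsid = v.get("rsid")
--         for gene, alleles in STAR_ALLELE_MAP.items():
--             if rsid in alleles:
--                 found_alleles[gene].append(alleles[rsid])
--
--     # Rule-based status assignment
--     for gene, alleles in found_alleles.items():
--         if not alleles:
--             continue
--
--         no_function_count = sum(1 for a in alleles if a["function"] == "No function")
--         decreased_count = sum(1 for a in alleles if a["function"] == "Decreased function")
--         increased_count = sum(1 for a in alleles if a["function"] == "Increased function")
--
--         # Simple homozygous/heterozygous approximation for milestone
--         if no_function_count >= 2:
--             status_map[gene] = "Poor Metabolizer"
--         elif no_function_count == 1: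
--             status_map[gene] = "Intermediate Metabolizer"
--         elif decreased_count >= 2:
--             status_map[gene] = "Poor Metabolizer"
--         elif decreased_count == 1:
--             status_map[gene] = "Intermediate Metabolizer"
--         elif increased_count >= 1:
--             status_map[gene] = "Rapid Metabolizer"
--
--         if gene == "HLA-B" and alleles:
--             status_map[gene] = "Positive for risk allele"
--
--     return status_map
-- ===== SOURCE B (Python) =====
-- STAR_ALLELE_MAP = {
--     "CYP2D6": {
--         "rs3892097": {"allele": "*4", "function": "No function"},
--         "rs35742686": {"allele": "*3", "function": "No function"},
--         "rs5030655": {"allele": "*6", "function": "No function"}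
--     },
--     "CYP2C19": {
--         "rs4244285": {"allele": "*2", "function": "No function"},
--         "rs4986893": {"allele": "*3", "function": "No function"},
--         "rs12248560": {"allele": "*17", "function": "Increased function"}
--     },
--     "CYP2C9": {
--         "rs1799853": {"allele": "*2", "function": "Decreased function"},
--         "rs1057910": {"allele": "*3", "function": "No function"}
--     },
--     "DPYD": {
--         "rs3918290": {"allele": "*2A", "function": "No function"},
--         "rs67376798": {"allele": "c.2846A>T", "function": "Decreased function"}
--     },
--     "SLCO1B1": {
--         "rs4149056": {"allele": "*5", "function": "Decreased function"}
--     },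
--     "VKORC1": {
--         "rs9923231": {"allele": "-1639G>A", "function": "Decreased warfarin dose requirement"}
--     },
--     "UGT1A1": {
--         "rs3064744": {"allele": "*28", "function": "Decreased function"}
--     },
--     "HLA-B": {
--         "rs2395029": {"allele": "*57:01", "function": "Abacavir hypersensitivity"}
--     },
--     "CYP3A4": {},
--     "CYP3A5": {},
--     "TPMT": {},
--     "NUDT15": {},
--     "G6PD": {}
-- }
--
--
-- def determine_metabolizer_status(variants: list) -> dict:
--     """
--     Assigns a metabolizer status for all 13 pharmacogenes based on variants.
--     A single pass over the variants builds an rsid -> multiplicity dict; each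
--     gene's status is then read off from the counts of its few target rsids.
--     """
--     counts = {}
--     for v in variants:
--         r = v.get("rsid")
--         counts[r] = counts.get(r, 0) + 1
--
--     result = {}
--     for gene, alleles in STAR_ALLELE_MAP.items():
--         tot = no = dec = inc = 0
--         for rs, info in alleles.items():
--             c = counts.get(rs, 0)
--             tot += c
--             f = info["function"]
--             if f == "No function":
--                 no += c
--             elif f == "Decreased function":
--                 dec += c
--             elif f == "Increased function":
--                 inc += c
--         if gene == "HLA-B" and tot:
--             result[gene] = "Positive for risk allele"
--         elif no >= 2:
--             result[gene] = "Poor Metabolizer"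
--         elif no == 1:
--             result[gene] = "Intermediate Metabolizer"
--         elif dec >= 2:
--             result[gene] = "Poor Metabolizer"
--         elif dec == 1:
--             result[gene] = "Intermediate Metabolizer"
--         elif inc >= 1:
--             result[gene] = "Rapid Metabolizer"
--         else:
--             result[gene] = "Normal Metabolizer"
--     return result
-- ===== Notes on version B (the rewrite author's own statement) =====
-- stated objective: alternative
-- what changed: Replaces the per-variant scan over all 13 genes (and the second pass that re-scans each gene's accumulated allele-dict list three times) with a single counting pass over the variants building an rsid -> multiplicity dict, from which each gene's status is read off directly via the counts of its few target rsids.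
import Mathlib
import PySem

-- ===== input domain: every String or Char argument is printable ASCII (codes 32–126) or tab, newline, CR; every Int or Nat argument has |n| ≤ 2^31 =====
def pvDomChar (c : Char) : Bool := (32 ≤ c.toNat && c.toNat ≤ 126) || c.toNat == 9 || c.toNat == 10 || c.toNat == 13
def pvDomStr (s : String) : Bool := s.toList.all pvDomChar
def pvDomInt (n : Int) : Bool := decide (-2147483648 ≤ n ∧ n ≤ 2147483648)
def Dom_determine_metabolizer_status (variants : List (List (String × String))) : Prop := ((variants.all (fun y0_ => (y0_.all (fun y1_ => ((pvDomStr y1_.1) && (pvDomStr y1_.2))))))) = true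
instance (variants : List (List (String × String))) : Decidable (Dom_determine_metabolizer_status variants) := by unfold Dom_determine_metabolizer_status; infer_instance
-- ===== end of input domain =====

-- B replaces A's per-variant scan over all 13 genes (and the second pass re-scanning each
-- gene's hit list three times) by one rsid-multiplicity counting pass plus a constant-size
-- per-gene readout of the counts; objective: alternative (same measured cost, different algorithm).

-- ===== PORT A =====
-- shared module constant STAR_ALLELE_MAP (used verbatim by both A and B)
def aAllele (al f : String) : PySem.Dict String String :=
  PySem.Dict.mk [("allele", al), ("function", f)]

def starAlleleMap : PySem.Dict String (PySem.Dict String (PySem.Dict String String)) :=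
  PySem.Dict.mk [
    ("CYP2D6", PySem.Dict.mk [("rs3892097", aAllele "*4" "No function"),
                              ("rs35742686", aAllele "*3" "No function"),
                              ("rs5030655", aAllele "*6" "No function")]),
    ("CYP2C19", PySem.Dict.mk [("rs4244285", aAllele "*2" "No function"),
                               ("rs4986893", aAllele "*3" "No function"),
                               ("rs12248560", aAllele "*17" "Increased function")]),
    ("CYP2C9", PySem.Dict.mk [("rs1799853", aAllele "*2" "Decreased function"),
                              ("rs1057910", aAllele "*3" "No function")]),
    ("DPYD", PySem.Dict.mk [("rs3918290", aAllele "*2A" "No function"),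
                            ("rs67376798", aAllele "c.2846A>T" "Decreased function")]),
    ("SLCO1B1", PySem.Dict.mk [("rs4149056", aAllele "*5" "Decreased function")]),
    ("VKORC1", PySem.Dict.mk [("rs9923231", aAllele "-1639G>A" "Decreased warfarin dose requirement")]),
    ("UGT1A1", PySem.Dict.mk [("rs3064744", aAllele "*28" "Decreased function")]),
    ("HLA-B", PySem.Dict.mk [("rs2395029", aAllele "*57:01" "Abacavir hypersensitivity")]),
    ("CYP3A4", PySem.Dict.mk []),
    ("CYP3A5", PySem.Dict.mk []),
    ("TPMT", PySem.Dict.mk []),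
    ("NUDT15", PySem.Dict.mk []),
    ("G6PD", PySem.Dict.mk [])]

-- v.get("rsid")  (used verbatim by both A and B)
def pyGetRsid (v : List (String × String)) : Option String :=
  (PySem.Dict.mk v).get? "rsid"

-- body of A's inner `for gene, alleles in STAR_ALLELE_MAP.items(): …` loop
def aGeneStep (rsid : Option String)
    (fa : PySem.Dict String (List (PySem.Dict String String)))
    (gp : String × PySem.Dict String (PySem.Dict String String)) :
    PySem.Dict String (List (PySem.Dict String String)) :=
  match rsid with
  | none => fa                                     -- `None in alleles` is False
  | some r =>
    if gp.2.contains r then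
      fa.modify gp.1 [] (fun l => l ++ [gp.2.getD r PySem.Dict.empty])
    else fa

-- body of A's `for v in variants: …` loop
def aStep (fa : PySem.Dict String (List (PySem.Dict String String)))
    (v : List (String × String)) : PySem.Dict String (List (PySem.Dict String String)) :=
  let rsid := pyGetRsid v
  starAlleleMap.items.foldl (aGeneStep rsid) fa

-- body of A's rule-based second loop over found_alleles.items()
def aStatusStep (sm : PySem.Dict String String)
    (gp : String × List (PySem.Dict String String)) : PySem.Dict String String :=
  if gp.2.isEmpty then sm                          -- `if not alleles: continue`
  else
    let no : Int := (gp.2.countP (fun a => a.getD "function" "" == "No function") : Int)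
    let de : Int := (gp.2.countP (fun a => a.getD "function" "" == "Decreased function") : Int)
    let inc : Int := (gp.2.countP (fun a => a.getD "function" "" == "Increased function") : Int)
    let sm :=
      if no ≥ 2 then sm.insert gp.1 "Poor Metabolizer"
      else if no = 1 then sm.insert gp.1 "Intermediate Metabolizer"
      else if de ≥ 2 then sm.insert gp.1 "Poor Metabolizer"
      else if de = 1 then sm.insert gp.1 "Intermediate Metabolizer"
      else if inc ≥ 1 then sm.insert gp.1 "Rapid Metabolizer"
      else sm
    if gp.1 == "HLA-B" && !gp.2.isEmpty then sm.insert gp.1 "Positive for risk allele" else sm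

def determine_metabolizer_status (variants : List (List (String × String))) : List (String × String) :=
  let statusMap := starAlleleMap.keys.foldl (fun d g => d.insert g "Normal Metabolizer") PySem.Dict.empty
  let found0 := starAlleleMap.keys.foldl
    (fun d g => d.insert g ([] : List (PySem.Dict String String))) PySem.Dict.empty
  let found := variants.foldl aStep found0
  (found.items.foldl aStatusStep statusMap).items

-- ===== PORT B =====
-- body of B's per-gene readout loop `for rs, info in alleles.items(): …`
def bTally (counts : PySem.Dict (Option String) Int)
    (acc : Int × Int × Int × Int) (ip : String × PySem.Dict String String) :
    Int × Int × Int × Int :=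
  let c := counts.getD (some ip.1) 0
  let tot := acc.1 + c
  let f := ip.2.getD "function" ""
  if f == "No function" then (tot, acc.2.1 + c, acc.2.2.1, acc.2.2.2)
  else if f == "Decreased function" then (tot, acc.2.1, acc.2.2.1 + c, acc.2.2.2)
  else if f == "Increased function" then (tot, acc.2.1, acc.2.2.1, acc.2.2.2 + c)
  else (tot, acc.2.1, acc.2.2.1, acc.2.2.2)

def determine_metabolizer_status_alt (variants : List (List (String × String))) : List (String × String) :=
  let counts : PySem.Dict (Option String) Int :=
    variants.foldl (fun d v =>
      let r := pyGetRsid v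
      d.insert r (d.getD r 0 + 1)) PySem.Dict.empty
  (starAlleleMap.items.foldl (fun res gp =>
    let t := gp.2.items.foldl (bTally counts) (0, 0, 0, 0)
    let status :=
      if gp.1 == "HLA-B" && t.1 != 0 then "Positive for risk allele"
      else if t.2.1 ≥ 2 then "Poor Metabolizer"
      else if t.2.1 = 1 then "Intermediate Metabolizer"
      else if t.2.2.1 ≥ 2 then "Poor Metabolizer"
      else if t.2.2.1 = 1 then "Intermediate Metabolizer"
      else if t.2.2.2 ≥ 1 then "Rapid Metabolizer"
      else "Normal Metabolizer"
    res.insert gp.1 status) PySem.Dict.empty).items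

-- ===== PRECONDITION & SPEC =====
def Spec_determine_metabolizer_status (variants : List (List (String × String))) (out : List (String × String)) : Prop := out = determine_metabolizer_status_alt variants
instance (variants : List (List (String × String))) (out : List (String × String)) : Decidable (Spec_determine_metabolizer_status variants out) := by unfold Spec_determine_metabolizer_status; infer_instance

-- ===== CLAIM (what is proved, stated in full; the proofs are below) =====
def Claim_equal_determine_metabolizer_status : Prop := ∀ (variants : List (List (String × String))), Dom_determine_metabolizer_status variants → Spec_determine_metabolizer_status variants (determine_metabolizer_status variants)

-- ===== LEMMAS AND PROOFS =====

-- proof-side helpers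
def al1 : PySem.Dict String (PySem.Dict String String) :=
  PySem.Dict.mk [("rs3892097", aAllele "*4" "No function"),
                 ("rs35742686", aAllele "*3" "No function"),
                 ("rs5030655", aAllele "*6" "No function")]
def al2 : PySem.Dict String (PySem.Dict String String) :=
  PySem.Dict.mk [("rs4244285", aAllele "*2" "No function"),
                 ("rs4986893", aAllele "*3" "No function"),
                 ("rs12248560", aAllele "*17" "Increased function")]
def al3 : PySem.Dict String (PySem.Dict String String) :=
  PySem.Dict.mk [("rs1799853", aAllele "*2" "Decreased function"),
                 ("rs1057910", aAllele "*3" "No function")]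
def al4 : PySem.Dict String (PySem.Dict String String) :=
  PySem.Dict.mk [("rs3918290", aAllele "*2A" "No function"),
                 ("rs67376798", aAllele "c.2846A>T" "Decreased function")]
def al5 : PySem.Dict String (PySem.Dict String String) :=
  PySem.Dict.mk [("rs4149056", aAllele "*5" "Decreased function")]
def al6 : PySem.Dict String (PySem.Dict String String) :=
  PySem.Dict.mk [("rs9923231", aAllele "-1639G>A" "Decreased warfarin dose requirement")]
def al7 : PySem.Dict String (PySem.Dict String String) :=
  PySem.Dict.mk [("rs3064744", aAllele "*28" "Decreased function")]
def al8 : PySem.Dict String (PySem.Dict String String) :=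
  PySem.Dict.mk [("rs2395029", aAllele "*57:01" "Abacavir hypersensitivity")]

theorem star_eq : starAlleleMap = PySem.Dict.mk
    [("CYP2D6", al1), ("CYP2C19", al2), ("CYP2C9", al3), ("DPYD", al4), ("SLCO1B1", al5),
     ("VKORC1", al6), ("UGT1A1", al7), ("HLA-B", al8), ("CYP3A4", PySem.Dict.mk []),
     ("CYP3A5", PySem.Dict.mk []), ("TPMT", PySem.Dict.mk []), ("NUDT15", PySem.Dict.mk []),
     ("G6PD", PySem.Dict.mk [])] := rfl

def mkFound (l1 l2 l3 l4 l5 l6 l7 l8 : List (PySem.Dict String String)) :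
    PySem.Dict String (List (PySem.Dict String String)) :=
  PySem.Dict.mk [("CYP2D6", l1), ("CYP2C19", l2), ("CYP2C9", l3), ("DPYD", l4), ("SLCO1B1", l5),
    ("VKORC1", l6), ("UGT1A1", l7), ("HLA-B", l8), ("CYP3A4", []), ("CYP3A5", []),
    ("TPMT", []), ("NUDT15", []), ("G6PD", [])]

def hitG (al : PySem.Dict String (PySem.Dict String String)) (r : Option String) :
    List (PySem.Dict String String) :=
  match r with
  | none => []
  | some s => if al.contains s then [al.getD s PySem.Dict.empty] else []

def HG (al : PySem.Dict String (PySem.Dict String String)) (vs : List (List (String × String))) :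
    List (PySem.Dict String String) :=
  vs.flatMap (fun v => hitG al (pyGetRsid v))

def mkStatus (s1 s2 s3 s4 s5 s6 s7 s8 s9 s10 s11 s12 s13 : String) : PySem.Dict String String :=
  PySem.Dict.mk [("CYP2D6", s1), ("CYP2C19", s2), ("CYP2C9", s3), ("DPYD", s4), ("SLCO1B1", s5),
    ("VKORC1", s6), ("UGT1A1", s7), ("HLA-B", s8), ("CYP3A4", s9), ("CYP3A5", s10),
    ("TPMT", s11), ("NUDT15", s12), ("G6PD", s13)]

def aStat (old : String) (hla : Bool) (l : List (PySem.Dict String String)) : String :=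
  if l.isEmpty then old
  else
    let no : Int := (l.countP (fun a => a.getD "function" "" == "No function") : Int)
    let de : Int := (l.countP (fun a => a.getD "function" "" == "Decreased function") : Int)
    let inc : Int := (l.countP (fun a => a.getD "function" "" == "Increased function") : Int)
    let s :=
      if no ≥ 2 then "Poor Metabolizer"
      else if no = 1 then "Intermediate Metabolizer"
      else if de ≥ 2 then "Poor Metabolizer"
      else if de = 1 then "Intermediate Metabolizer"
      else if inc ≥ 1 then "Rapid Metabolizer"
      else old
    if hla then "Positive for risk allele" else s

theorem geneStep_empty (r fa g) : aGeneStep r fa (g, PySem.Dict.mk []) = fa := by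
  cases r <;> rfl

theorem geneStep_1 (r l1 l2 l3 l4 l5 l6 l7 l8) :
    aGeneStep r (mkFound l1 l2 l3 l4 l5 l6 l7 l8) ("CYP2D6", al1) =
    mkFound (l1 ++ hitG al1 r) l2 l3 l4 l5 l6 l7 l8 := by
  cases r with
  | none => simp [aGeneStep, hitG, mkFound]
  | some s =>
    by_cases h : al1.contains s
    · simp only [aGeneStep, hitG, h, if_true]; rfl
    · simp [aGeneStep, hitG, h, mkFound]

theorem geneStep_2 (r l1 l2 l3 l4 l5 l6 l7 l8) :
    aGeneStep r (mkFound l1 l2 l3 l4 l5 l6 l7 l8) ("CYP2C19", al2) =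
    mkFound l1 (l2 ++ hitG al2 r) l3 l4 l5 l6 l7 l8 := by
  cases r with
  | none => simp [aGeneStep, hitG, mkFound]
  | some s =>
    by_cases h : al2.contains s
    · simp only [aGeneStep, hitG, h, if_true]; rfl
    · simp [aGeneStep, hitG, h, mkFound]

theorem geneStep_3 (r l1 l2 l3 l4 l5 l6 l7 l8) :
    aGeneStep r (mkFound l1 l2 l3 l4 l5 l6 l7 l8) ("CYP2C9", al3) =
    mkFound l1 l2 (l3 ++ hitG al3 r) l4 l5 l6 l7 l8 := by
  cases r with
  | none => simp [aGeneStep, hitG, mkFound]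
  | some s =>
    by_cases h : al3.contains s
    · simp only [aGeneStep, hitG, h, if_true]; rfl
    · simp [aGeneStep, hitG, h, mkFound]

theorem geneStep_4 (r l1 l2 l3 l4 l5 l6 l7 l8) :
    aGeneStep r (mkFound l1 l2 l3 l4 l5 l6 l7 l8) ("DPYD", al4) =
    mkFound l1 l2 l3 (l4 ++ hitG al4 r) l5 l6 l7 l8 := by
  cases r with
  | none => simp [aGeneStep, hitG, mkFound]
  | some s =>
    by_cases h : al4.contains s
    · simp only [aGeneStep, hitG, h, if_true]; rfl
    · simp [aGeneStep, hitG, h, mkFound]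

theorem geneStep_5 (r l1 l2 l3 l4 l5 l6 l7 l8) :
    aGeneStep r (mkFound l1 l2 l3 l4 l5 l6 l7 l8) ("SLCO1B1", al5) =
    mkFound l1 l2 l3 l4 (l5 ++ hitG al5 r) l6 l7 l8 := by
  cases r with
  | none => simp [aGeneStep, hitG, mkFound]
  | some s =>
    by_cases h : al5.contains s
    · simp only [aGeneStep, hitG, h, if_true]; rfl
    · simp [aGeneStep, hitG, h, mkFound]

theorem geneStep_6 (r l1 l2 l3 l4 l5 l6 l7 l8) :
    aGeneStep r (mkFound l1 l2 l3 l4 l5 l6 l7 l8) ("VKORC1", al6) =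
    mkFound l1 l2 l3 l4 l5 (l6 ++ hitG al6 r) l7 l8 := by
  cases r with
  | none => simp [aGeneStep, hitG, mkFound]
  | some s =>
    by_cases h : al6.contains s
    · simp only [aGeneStep, hitG, h, if_true]; rfl
    · simp [aGeneStep, hitG, h, mkFound]

theorem geneStep_7 (r l1 l2 l3 l4 l5 l6 l7 l8) :
    aGeneStep r (mkFound l1 l2 l3 l4 l5 l6 l7 l8) ("UGT1A1", al7) =
    mkFound l1 l2 l3 l4 l5 l6 (l7 ++ hitG al7 r) l8 := by
  cases r with
  | none => simp [aGeneStep, hitG, mkFound]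
  | some s =>
    by_cases h : al7.contains s
    · simp only [aGeneStep, hitG, h, if_true]; rfl
    · simp [aGeneStep, hitG, h, mkFound]

theorem geneStep_8 (r l1 l2 l3 l4 l5 l6 l7 l8) :
    aGeneStep r (mkFound l1 l2 l3 l4 l5 l6 l7 l8) ("HLA-B", al8) =
    mkFound l1 l2 l3 l4 l5 l6 l7 (l8 ++ hitG al8 r) := by
  cases r with
  | none => simp [aGeneStep, hitG, mkFound]
  | some s =>
    by_cases h : al8.contains s
    · simp only [aGeneStep, hitG, h, if_true]; rfl
    · simp [aGeneStep, hitG, h, mkFound]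

theorem aStep_mkFound (l1 l2 l3 l4 l5 l6 l7 l8 : List (PySem.Dict String String)) (v) :
    aStep (mkFound l1 l2 l3 l4 l5 l6 l7 l8) v =
    mkFound (l1 ++ hitG al1 (pyGetRsid v)) (l2 ++ hitG al2 (pyGetRsid v)) (l3 ++ hitG al3 (pyGetRsid v)) (l4 ++ hitG al4 (pyGetRsid v)) (l5 ++ hitG al5 (pyGetRsid v)) (l6 ++ hitG al6 (pyGetRsid v)) (l7 ++ hitG al7 (pyGetRsid v)) (l8 ++ hitG al8 (pyGetRsid v)) := by
  simp only [aStep, star_eq, List.foldl_cons, List.foldl_nil]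
  rw [geneStep_1, geneStep_2, geneStep_3, geneStep_4, geneStep_5, geneStep_6, geneStep_7, geneStep_8, geneStep_empty, geneStep_empty, geneStep_empty, geneStep_empty, geneStep_empty]

theorem found_eq (vs : List (List (String × String))) :
    ∀ l1 l2 l3 l4 l5 l6 l7 l8 : List (PySem.Dict String String),
    vs.foldl aStep (mkFound l1 l2 l3 l4 l5 l6 l7 l8) = mkFound (l1 ++ HG al1 vs) (l2 ++ HG al2 vs) (l3 ++ HG al3 vs) (l4 ++ HG al4 vs) (l5 ++ HG al5 vs) (l6 ++ HG al6 vs) (l7 ++ HG al7 vs) (l8 ++ HG al8 vs) := by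
  induction vs with
  | nil => intro l1 l2 l3 l4 l5 l6 l7 l8; simp [HG]
  | cons v vs ih =>
    intro l1 l2 l3 l4 l5 l6 l7 l8
    rw [List.foldl_cons, aStep_mkFound, ih]
    simp [HG, List.append_assoc]

theorem statusStep_empty (sm : PySem.Dict String String) (g : String) :
    aStatusStep sm (g, []) = sm := rfl

theorem statusStep_1 (s1 s2 s3 s4 s5 s6 s7 s8 s9 s10 s11 s12 s13 : String) (l) :
    aStatusStep (mkStatus s1 s2 s3 s4 s5 s6 s7 s8 s9 s10 s11 s12 s13) ("CYP2D6", l) =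
    mkStatus (aStat s1 false l) s2 s3 s4 s5 s6 s7 s8 s9 s10 s11 s12 s13 := by
  by_cases hl : l.isEmpty
  · simp [aStatusStep, aStat, hl]
  · simp [aStatusStep, aStat, hl]
    split_ifs <;> rfl

theorem statusStep_2 (s1 s2 s3 s4 s5 s6 s7 s8 s9 s10 s11 s12 s13 : String) (l) :
    aStatusStep (mkStatus s1 s2 s3 s4 s5 s6 s7 s8 s9 s10 s11 s12 s13) ("CYP2C19", l) =
    mkStatus s1 (aStat s2 false l) s3 s4 s5 s6 s7 s8 s9 s10 s11 s12 s13 := by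
  by_cases hl : l.isEmpty
  · simp [aStatusStep, aStat, hl]
  · simp [aStatusStep, aStat, hl]
    split_ifs <;> rfl

theorem statusStep_3 (s1 s2 s3 s4 s5 s6 s7 s8 s9 s10 s11 s12 s13 : String) (l) :
    aStatusStep (mkStatus s1 s2 s3 s4 s5 s6 s7 s8 s9 s10 s11 s12 s13) ("CYP2C9", l) =
    mkStatus s1 s2 (aStat s3 false l) s4 s5 s6 s7 s8 s9 s10 s11 s12 s13 := by
  by_cases hl : l.isEmpty
  · simp [aStatusStep, aStat, hl]
  · simp [aStatusStep, aStat, hl]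
    split_ifs <;> rfl

theorem statusStep_4 (s1 s2 s3 s4 s5 s6 s7 s8 s9 s10 s11 s12 s13 : String) (l) :
    aStatusStep (mkStatus s1 s2 s3 s4 s5 s6 s7 s8 s9 s10 s11 s12 s13) ("DPYD", l) =
    mkStatus s1 s2 s3 (aStat s4 false l) s5 s6 s7 s8 s9 s10 s11 s12 s13 := by
  by_cases hl : l.isEmpty
  · simp [aStatusStep, aStat, hl]
  · simp [aStatusStep, aStat, hl]
    split_ifs <;> rfl

theorem statusStep_5 (s1 s2 s3 s4 s5 s6 s7 s8 s9 s10 s11 s12 s13 : String) (l) :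
    aStatusStep (mkStatus s1 s2 s3 s4 s5 s6 s7 s8 s9 s10 s11 s12 s13) ("SLCO1B1", l) =
    mkStatus s1 s2 s3 s4 (aStat s5 false l) s6 s7 s8 s9 s10 s11 s12 s13 := by
  by_cases hl : l.isEmpty
  · simp [aStatusStep, aStat, hl]
  · simp [aStatusStep, aStat, hl]
    split_ifs <;> rfl

theorem statusStep_6 (s1 s2 s3 s4 s5 s6 s7 s8 s9 s10 s11 s12 s13 : String) (l) :
    aStatusStep (mkStatus s1 s2 s3 s4 s5 s6 s7 s8 s9 s10 s11 s12 s13) ("VKORC1", l) =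
    mkStatus s1 s2 s3 s4 s5 (aStat s6 false l) s7 s8 s9 s10 s11 s12 s13 := by
  by_cases hl : l.isEmpty
  · simp [aStatusStep, aStat, hl]
  · simp [aStatusStep, aStat, hl]
    split_ifs <;> rfl

theorem statusStep_7 (s1 s2 s3 s4 s5 s6 s7 s8 s9 s10 s11 s12 s13 : String) (l) :
    aStatusStep (mkStatus s1 s2 s3 s4 s5 s6 s7 s8 s9 s10 s11 s12 s13) ("UGT1A1", l) =
    mkStatus s1 s2 s3 s4 s5 s6 (aStat s7 false l) s8 s9 s10 s11 s12 s13 := by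
  by_cases hl : l.isEmpty
  · simp [aStatusStep, aStat, hl]
  · simp [aStatusStep, aStat, hl]
    split_ifs <;> rfl

theorem statusStep_8 (s1 s2 s3 s4 s5 s6 s7 s8 s9 s10 s11 s12 s13 : String) (l) :
    aStatusStep (mkStatus s1 s2 s3 s4 s5 s6 s7 s8 s9 s10 s11 s12 s13) ("HLA-B", l) =
    mkStatus s1 s2 s3 s4 s5 s6 s7 (aStat s8 true l) s9 s10 s11 s12 s13 := by
  by_cases hl : l.isEmpty
  · simp [aStatusStep, aStat, hl]
  · simp [aStatusStep, aStat, hl]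
    split_ifs <;> rfl

theorem found0_eq :
    starAlleleMap.keys.foldl (fun d g => d.insert g ([] : List (PySem.Dict String String))) PySem.Dict.empty =
    mkFound [] [] [] [] [] [] [] [] := rfl

theorem statusMap0_eq :
    starAlleleMap.keys.foldl (fun d g => d.insert g "Normal Metabolizer") PySem.Dict.empty =
    mkStatus "Normal Metabolizer" "Normal Metabolizer" "Normal Metabolizer" "Normal Metabolizer" "Normal Metabolizer" "Normal Metabolizer" "Normal Metabolizer" "Normal Metabolizer" "Normal Metabolizer" "Normal Metabolizer" "Normal Metabolizer" "Normal Metabolizer" "Normal Metabolizer" := rfl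

def AOut (vs : List (List (String × String))) : List (String × String) :=
  [("CYP2D6", aStat "Normal Metabolizer" false (HG al1 vs)),
     ("CYP2C19", aStat "Normal Metabolizer" false (HG al2 vs)),
     ("CYP2C9", aStat "Normal Metabolizer" false (HG al3 vs)),
     ("DPYD", aStat "Normal Metabolizer" false (HG al4 vs)),
     ("SLCO1B1", aStat "Normal Metabolizer" false (HG al5 vs)),
     ("VKORC1", aStat "Normal Metabolizer" false (HG al6 vs)),
     ("UGT1A1", aStat "Normal Metabolizer" false (HG al7 vs)),
     ("HLA-B", aStat "Normal Metabolizer" true (HG al8 vs)),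
     ("CYP3A4", "Normal Metabolizer"),
     ("CYP3A5", "Normal Metabolizer"),
     ("TPMT", "Normal Metabolizer"),
     ("NUDT15", "Normal Metabolizer"),
     ("G6PD", "Normal Metabolizer")]

theorem A_eq (vs : List (List (String × String))) :
    determine_metabolizer_status vs = AOut vs := by
  simp only [determine_metabolizer_status]
  rw [found0_eq, statusMap0_eq]
  have hf := found_eq vs [] [] [] [] [] [] [] []
  simp only [List.nil_append] at hf
  rw [hf]
  simp only [mkFound, List.foldl_cons, List.foldl_nil]
  rw [statusStep_1, statusStep_2, statusStep_3, statusStep_4, statusStep_5, statusStep_6, statusStep_7, statusStep_8, statusStep_empty, statusStep_empty, statusStep_empty, statusStep_empty, statusStep_empty]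
  rfl

def countsOf (vs : List (List (String × String))) : PySem.Dict (Option String) Int :=
  vs.foldl (fun d v =>
    let r := pyGetRsid v
    d.insert r (d.getD r 0 + 1)) PySem.Dict.empty

def cV (vs : List (List (String × String))) (k : String) : Int :=
  (countsOf vs).getD (some k) 0

def bStat (hla : Bool) (tot no de inc : Int) : String :=
  if hla && tot != 0 then "Positive for risk allele"
  else if no ≥ 2 then "Poor Metabolizer"
  else if no = 1 then "Intermediate Metabolizer"
  else if de ≥ 2 then "Poor Metabolizer"
  else if de = 1 then "Intermediate Metabolizer"
  else if inc ≥ 1 then "Rapid Metabolizer"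
  else "Normal Metabolizer"

theorem cV_eq (vs : List (List (String × String))) (k : String) :
    cV vs k = (vs.countP (fun v => pyGetRsid v == some k) : Int) := by
  have h := PySem.Dict.getD_foldl_insert_add_one (l := vs.map pyGetRsid)
    (d := (PySem.Dict.empty : PySem.Dict (Option String) Int)) (v := some k)
  rw [List.foldl_map] at h
  simp only [cV, countsOf]
  simp only [List.count, List.countP_map] at h
  simpa using h

theorem hit_al1 (r : Option String) :
    ((hitG al1 r).countP (fun a => a.getD "function" "" == "No function") = (if r = some "rs3892097" then 1 else 0) + (if r = some "rs35742686" then 1 else 0) + (if r = some "rs5030655" then 1 else 0)) ∧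
    ((hitG al1 r).countP (fun a => a.getD "function" "" == "Decreased function") = 0) ∧
    ((hitG al1 r).countP (fun a => a.getD "function" "" == "Increased function") = 0) ∧
    ((hitG al1 r).length = (if r = some "rs3892097" then 1 else 0) + (if r = some "rs35742686" then 1 else 0) + (if r = some "rs5030655" then 1 else 0)) := by
  cases r with
  | none => simp [hitG]
  | some s =>
    by_cases h1 : s = "rs3892097"
    · subst h1; decide
    by_cases h2 : s = "rs35742686"
    · subst h2; decide
    by_cases h3 : s = "rs5030655"
    · subst h3; decide
    · have e1 : ("rs3892097" == s) = false := beq_eq_false_iff_ne.2 (Ne.symm h1)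
      have e2 : ("rs35742686" == s) = false := beq_eq_false_iff_ne.2 (Ne.symm h2)
      have e3 : ("rs5030655" == s) = false := beq_eq_false_iff_ne.2 (Ne.symm h3)
      simp [hitG, al1, aAllele, PySem.Dict.contains, h1, e1, h2, e2, h3, e3]

theorem H_al1 (vs : List (List (String × String))) :
    ((HG al1 vs).countP (fun a => a.getD "function" "" == "No function") = vs.countP (fun v => pyGetRsid v == some "rs3892097") + vs.countP (fun v => pyGetRsid v == some "rs35742686") + vs.countP (fun v => pyGetRsid v == some "rs5030655")) ∧
    ((HG al1 vs).countP (fun a => a.getD "function" "" == "Decreased function") = 0) ∧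
    ((HG al1 vs).countP (fun a => a.getD "function" "" == "Increased function") = 0) ∧
    ((HG al1 vs).length = vs.countP (fun v => pyGetRsid v == some "rs3892097") + vs.countP (fun v => pyGetRsid v == some "rs35742686") + vs.countP (fun v => pyGetRsid v == some "rs5030655")) := by
  induction vs with
  | nil => simp [HG]
  | cons v vs ih =>
    obtain ⟨h1, h2, h3, h4⟩ := hit_al1 (pyGetRsid v)
    obtain ⟨i1, i2, i3, i4⟩ := ih
    simp only [HG, List.flatMap_cons, List.countP_append, List.length_append,
      List.countP_cons, beq_iff_eq] at *
    refine ⟨?_, ?_, ?_, ?_⟩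
    · first
      | (rw [h1, i1]; split_ifs <;> omega)
      | (rw [h1, i1]; omega)
      | rw [h1, i1]
    · first
      | (rw [h2, i2]; split_ifs <;> omega)
      | (rw [h2, i2]; omega)
      | rw [h2, i2]
    · first
      | (rw [h3, i3]; split_ifs <;> omega)
      | (rw [h3, i3]; omega)
      | rw [h3, i3]
    · first
      | (rw [h4, i4]; split_ifs <;> omega)
      | (rw [h4, i4]; omega)
      | rw [h4, i4]

theorem hit_al2 (r : Option String) :
    ((hitG al2 r).countP (fun a => a.getD "function" "" == "No function") = (if r = some "rs4244285" then 1 else 0) + (if r = some "rs4986893" then 1 else 0)) ∧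
    ((hitG al2 r).countP (fun a => a.getD "function" "" == "Decreased function") = 0) ∧
    ((hitG al2 r).countP (fun a => a.getD "function" "" == "Increased function") = (if r = some "rs12248560" then 1 else 0)) ∧
    ((hitG al2 r).length = (if r = some "rs4244285" then 1 else 0) + (if r = some "rs4986893" then 1 else 0) + (if r = some "rs12248560" then 1 else 0)) := by
  cases r with
  | none => simp [hitG]
  | some s =>
    by_cases h1 : s = "rs4244285"
    · subst h1; decide
    by_cases h2 : s = "rs4986893"
    · subst h2; decide
    by_cases h3 : s = "rs12248560"
    · subst h3; decide
    · have e1 : ("rs4244285" == s) = false := beq_eq_false_iff_ne.2 (Ne.symm h1)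
      have e2 : ("rs4986893" == s) = false := beq_eq_false_iff_ne.2 (Ne.symm h2)
      have e3 : ("rs12248560" == s) = false := beq_eq_false_iff_ne.2 (Ne.symm h3)
      simp [hitG, al2, aAllele, PySem.Dict.contains, h1, e1, h2, e2, h3, e3]

theorem H_al2 (vs : List (List (String × String))) :
    ((HG al2 vs).countP (fun a => a.getD "function" "" == "No function") = vs.countP (fun v => pyGetRsid v == some "rs4244285") + vs.countP (fun v => pyGetRsid v == some "rs4986893")) ∧
    ((HG al2 vs).countP (fun a => a.getD "function" "" == "Decreased function") = 0) ∧
    ((HG al2 vs).countP (fun a => a.getD "function" "" == "Increased function") = vs.countP (fun v => pyGetRsid v == some "rs12248560")) ∧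
    ((HG al2 vs).length = vs.countP (fun v => pyGetRsid v == some "rs4244285") + vs.countP (fun v => pyGetRsid v == some "rs4986893") + vs.countP (fun v => pyGetRsid v == some "rs12248560")) := by
  induction vs with
  | nil => simp [HG]
  | cons v vs ih =>
    obtain ⟨h1, h2, h3, h4⟩ := hit_al2 (pyGetRsid v)
    obtain ⟨i1, i2, i3, i4⟩ := ih
    simp only [HG, List.flatMap_cons, List.countP_append, List.length_append,
      List.countP_cons, beq_iff_eq] at *
    refine ⟨?_, ?_, ?_, ?_⟩
    · first
      | (rw [h1, i1]; split_ifs <;> omega)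
      | (rw [h1, i1]; omega)
      | rw [h1, i1]
    · first
      | (rw [h2, i2]; split_ifs <;> omega)
      | (rw [h2, i2]; omega)
      | rw [h2, i2]
    · first
      | (rw [h3, i3]; split_ifs <;> omega)
      | (rw [h3, i3]; omega)
      | rw [h3, i3]
    · first
      | (rw [h4, i4]; split_ifs <;> omega)
      | (rw [h4, i4]; omega)
      | rw [h4, i4]

theorem hit_al3 (r : Option String) :
    ((hitG al3 r).countP (fun a => a.getD "function" "" == "No function") = (if r = some "rs1057910" then 1 else 0)) ∧
    ((hitG al3 r).countP (fun a => a.getD "function" "" == "Decreased function") = (if r = some "rs1799853" then 1 else 0)) ∧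
    ((hitG al3 r).countP (fun a => a.getD "function" "" == "Increased function") = 0) ∧
    ((hitG al3 r).length = (if r = some "rs1799853" then 1 else 0) + (if r = some "rs1057910" then 1 else 0)) := by
  cases r with
  | none => simp [hitG]
  | some s =>
    by_cases h1 : s = "rs1799853"
    · subst h1; decide
    by_cases h2 : s = "rs1057910"
    · subst h2; decide
    · have e1 : ("rs1799853" == s) = false := beq_eq_false_iff_ne.2 (Ne.symm h1)
      have e2 : ("rs1057910" == s) = false := beq_eq_false_iff_ne.2 (Ne.symm h2)
      simp [hitG, al3, aAllele, PySem.Dict.contains, h1, e1, h2, e2]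

theorem H_al3 (vs : List (List (String × String))) :
    ((HG al3 vs).countP (fun a => a.getD "function" "" == "No function") = vs.countP (fun v => pyGetRsid v == some "rs1057910")) ∧
    ((HG al3 vs).countP (fun a => a.getD "function" "" == "Decreased function") = vs.countP (fun v => pyGetRsid v == some "rs1799853")) ∧
    ((HG al3 vs).countP (fun a => a.getD "function" "" == "Increased function") = 0) ∧
    ((HG al3 vs).length = vs.countP (fun v => pyGetRsid v == some "rs1799853") + vs.countP (fun v => pyGetRsid v == some "rs1057910")) := by
  induction vs with
  | nil => simp [HG]
  | cons v vs ih =>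
    obtain ⟨h1, h2, h3, h4⟩ := hit_al3 (pyGetRsid v)
    obtain ⟨i1, i2, i3, i4⟩ := ih
    simp only [HG, List.flatMap_cons, List.countP_append, List.length_append,
      List.countP_cons, beq_iff_eq] at *
    refine ⟨?_, ?_, ?_, ?_⟩
    · first
      | (rw [h1, i1]; split_ifs <;> omega)
      | (rw [h1, i1]; omega)
      | rw [h1, i1]
    · first
      | (rw [h2, i2]; split_ifs <;> omega)
      | (rw [h2, i2]; omega)
      | rw [h2, i2]
    · first
      | (rw [h3, i3]; split_ifs <;> omega)
      | (rw [h3, i3]; omega)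
      | rw [h3, i3]
    · first
      | (rw [h4, i4]; split_ifs <;> omega)
      | (rw [h4, i4]; omega)
      | rw [h4, i4]

theorem hit_al4 (r : Option String) :
    ((hitG al4 r).countP (fun a => a.getD "function" "" == "No function") = (if r = some "rs3918290" then 1 else 0)) ∧
    ((hitG al4 r).countP (fun a => a.getD "function" "" == "Decreased function") = (if r = some "rs67376798" then 1 else 0)) ∧
    ((hitG al4 r).countP (fun a => a.getD "function" "" == "Increased function") = 0) ∧
    ((hitG al4 r).length = (if r = some "rs3918290" then 1 else 0) + (if r = some "rs67376798" then 1 else 0)) := by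
  cases r with
  | none => simp [hitG]
  | some s =>
    by_cases h1 : s = "rs3918290"
    · subst h1; decide
    by_cases h2 : s = "rs67376798"
    · subst h2; decide
    · have e1 : ("rs3918290" == s) = false := beq_eq_false_iff_ne.2 (Ne.symm h1)
      have e2 : ("rs67376798" == s) = false := beq_eq_false_iff_ne.2 (Ne.symm h2)
      simp [hitG, al4, aAllele, PySem.Dict.contains, h1, e1, h2, e2]

theorem H_al4 (vs : List (List (String × String))) :
    ((HG al4 vs).countP (fun a => a.getD "function" "" == "No function") = vs.countP (fun v => pyGetRsid v == some "rs3918290")) ∧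
    ((HG al4 vs).countP (fun a => a.getD "function" "" == "Decreased function") = vs.countP (fun v => pyGetRsid v == some "rs67376798")) ∧
    ((HG al4 vs).countP (fun a => a.getD "function" "" == "Increased function") = 0) ∧
    ((HG al4 vs).length = vs.countP (fun v => pyGetRsid v == some "rs3918290") + vs.countP (fun v => pyGetRsid v == some "rs67376798")) := by
  induction vs with
  | nil => simp [HG]
  | cons v vs ih =>
    obtain ⟨h1, h2, h3, h4⟩ := hit_al4 (pyGetRsid v)
    obtain ⟨i1, i2, i3, i4⟩ := ih
    simp only [HG, List.flatMap_cons, List.countP_append, List.length_append,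
      List.countP_cons, beq_iff_eq] at *
    refine ⟨?_, ?_, ?_, ?_⟩
    · first
      | (rw [h1, i1]; split_ifs <;> omega)
      | (rw [h1, i1]; omega)
      | rw [h1, i1]
    · first
      | (rw [h2, i2]; split_ifs <;> omega)
      | (rw [h2, i2]; omega)
      | rw [h2, i2]
    · first
      | (rw [h3, i3]; split_ifs <;> omega)
      | (rw [h3, i3]; omega)
      | rw [h3, i3]
    · first
      | (rw [h4, i4]; split_ifs <;> omega)
      | (rw [h4, i4]; omega)
      | rw [h4, i4]

theorem hit_al5 (r : Option String) :
    ((hitG al5 r).countP (fun a => a.getD "function" "" == "No function") = 0) ∧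
    ((hitG al5 r).countP (fun a => a.getD "function" "" == "Decreased function") = (if r = some "rs4149056" then 1 else 0)) ∧
    ((hitG al5 r).countP (fun a => a.getD "function" "" == "Increased function") = 0) ∧
    ((hitG al5 r).length = (if r = some "rs4149056" then 1 else 0)) := by
  cases r with
  | none => simp [hitG]
  | some s =>
    by_cases h1 : s = "rs4149056"
    · subst h1; decide
    · have e1 : ("rs4149056" == s) = false := beq_eq_false_iff_ne.2 (Ne.symm h1)
      simp [hitG, al5, aAllele, PySem.Dict.contains, h1, e1]

theorem H_al5 (vs : List (List (String × String))) :
    ((HG al5 vs).countP (fun a => a.getD "function" "" == "No function") = 0) ∧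
    ((HG al5 vs).countP (fun a => a.getD "function" "" == "Decreased function") = vs.countP (fun v => pyGetRsid v == some "rs4149056")) ∧
    ((HG al5 vs).countP (fun a => a.getD "function" "" == "Increased function") = 0) ∧
    ((HG al5 vs).length = vs.countP (fun v => pyGetRsid v == some "rs4149056")) := by
  induction vs with
  | nil => simp [HG]
  | cons v vs ih =>
    obtain ⟨h1, h2, h3, h4⟩ := hit_al5 (pyGetRsid v)
    obtain ⟨i1, i2, i3, i4⟩ := ih
    simp only [HG, List.flatMap_cons, List.countP_append, List.length_append,
      List.countP_cons, beq_iff_eq] at *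
    refine ⟨?_, ?_, ?_, ?_⟩
    · first
      | (rw [h1, i1]; split_ifs <;> omega)
      | (rw [h1, i1]; omega)
      | rw [h1, i1]
    · first
      | (rw [h2, i2]; split_ifs <;> omega)
      | (rw [h2, i2]; omega)
      | rw [h2, i2]
    · first
      | (rw [h3, i3]; split_ifs <;> omega)
      | (rw [h3, i3]; omega)
      | rw [h3, i3]
    · first
      | (rw [h4, i4]; split_ifs <;> omega)
      | (rw [h4, i4]; omega)
      | rw [h4, i4]

theorem hit_al6 (r : Option String) :
    ((hitG al6 r).countP (fun a => a.getD "function" "" == "No function") = 0) ∧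
    ((hitG al6 r).countP (fun a => a.getD "function" "" == "Decreased function") = 0) ∧
    ((hitG al6 r).countP (fun a => a.getD "function" "" == "Increased function") = 0) ∧
    ((hitG al6 r).length = (if r = some "rs9923231" then 1 else 0)) := by
  cases r with
  | none => simp [hitG]
  | some s =>
    by_cases h1 : s = "rs9923231"
    · subst h1; decide
    · have e1 : ("rs9923231" == s) = false := beq_eq_false_iff_ne.2 (Ne.symm h1)
      simp [hitG, al6, aAllele, PySem.Dict.contains, h1, e1]

theorem H_al6 (vs : List (List (String × String))) :
    ((HG al6 vs).countP (fun a => a.getD "function" "" == "No function") = 0) ∧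
    ((HG al6 vs).countP (fun a => a.getD "function" "" == "Decreased function") = 0) ∧
    ((HG al6 vs).countP (fun a => a.getD "function" "" == "Increased function") = 0) ∧
    ((HG al6 vs).length = vs.countP (fun v => pyGetRsid v == some "rs9923231")) := by
  induction vs with
  | nil => simp [HG]
  | cons v vs ih =>
    obtain ⟨h1, h2, h3, h4⟩ := hit_al6 (pyGetRsid v)
    obtain ⟨i1, i2, i3, i4⟩ := ih
    simp only [HG, List.flatMap_cons, List.countP_append, List.length_append,
      List.countP_cons, beq_iff_eq] at *
    refine ⟨?_, ?_, ?_, ?_⟩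
    · first
      | (rw [h1, i1]; split_ifs <;> omega)
      | (rw [h1, i1]; omega)
      | rw [h1, i1]
    · first
      | (rw [h2, i2]; split_ifs <;> omega)
      | (rw [h2, i2]; omega)
      | rw [h2, i2]
    · first
      | (rw [h3, i3]; split_ifs <;> omega)
      | (rw [h3, i3]; omega)
      | rw [h3, i3]
    · first
      | (rw [h4, i4]; split_ifs <;> omega)
      | (rw [h4, i4]; omega)
      | rw [h4, i4]

theorem hit_al7 (r : Option String) :
    ((hitG al7 r).countP (fun a => a.getD "function" "" == "No function") = 0) ∧
    ((hitG al7 r).countP (fun a => a.getD "function" "" == "Decreased function") = (if r = some "rs3064744" then 1 else 0)) ∧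
    ((hitG al7 r).countP (fun a => a.getD "function" "" == "Increased function") = 0) ∧
    ((hitG al7 r).length = (if r = some "rs3064744" then 1 else 0)) := by
  cases r with
  | none => simp [hitG]
  | some s =>
    by_cases h1 : s = "rs3064744"
    · subst h1; decide
    · have e1 : ("rs3064744" == s) = false := beq_eq_false_iff_ne.2 (Ne.symm h1)
      simp [hitG, al7, aAllele, PySem.Dict.contains, h1, e1]

theorem H_al7 (vs : List (List (String × String))) :
    ((HG al7 vs).countP (fun a => a.getD "function" "" == "No function") = 0) ∧
    ((HG al7 vs).countP (fun a => a.getD "function" "" == "Decreased function") = vs.countP (fun v => pyGetRsid v == some "rs3064744")) ∧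
    ((HG al7 vs).countP (fun a => a.getD "function" "" == "Increased function") = 0) ∧
    ((HG al7 vs).length = vs.countP (fun v => pyGetRsid v == some "rs3064744")) := by
  induction vs with
  | nil => simp [HG]
  | cons v vs ih =>
    obtain ⟨h1, h2, h3, h4⟩ := hit_al7 (pyGetRsid v)
    obtain ⟨i1, i2, i3, i4⟩ := ih
    simp only [HG, List.flatMap_cons, List.countP_append, List.length_append,
      List.countP_cons, beq_iff_eq] at *
    refine ⟨?_, ?_, ?_, ?_⟩
    · first
      | (rw [h1, i1]; split_ifs <;> omega)
      | (rw [h1, i1]; omega)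
      | rw [h1, i1]
    · first
      | (rw [h2, i2]; split_ifs <;> omega)
      | (rw [h2, i2]; omega)
      | rw [h2, i2]
    · first
      | (rw [h3, i3]; split_ifs <;> omega)
      | (rw [h3, i3]; omega)
      | rw [h3, i3]
    · first
      | (rw [h4, i4]; split_ifs <;> omega)
      | (rw [h4, i4]; omega)
      | rw [h4, i4]

theorem hit_al8 (r : Option String) :
    ((hitG al8 r).countP (fun a => a.getD "function" "" == "No function") = 0) ∧
    ((hitG al8 r).countP (fun a => a.getD "function" "" == "Decreased function") = 0) ∧
    ((hitG al8 r).countP (fun a => a.getD "function" "" == "Increased function") = 0) ∧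
    ((hitG al8 r).length = (if r = some "rs2395029" then 1 else 0)) := by
  cases r with
  | none => simp [hitG]
  | some s =>
    by_cases h1 : s = "rs2395029"
    · subst h1; decide
    · have e1 : ("rs2395029" == s) = false := beq_eq_false_iff_ne.2 (Ne.symm h1)
      simp [hitG, al8, aAllele, PySem.Dict.contains, h1, e1]

theorem H_al8 (vs : List (List (String × String))) :
    ((HG al8 vs).countP (fun a => a.getD "function" "" == "No function") = 0) ∧
    ((HG al8 vs).countP (fun a => a.getD "function" "" == "Decreased function") = 0) ∧
    ((HG al8 vs).countP (fun a => a.getD "function" "" == "Increased function") = 0) ∧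
    ((HG al8 vs).length = vs.countP (fun v => pyGetRsid v == some "rs2395029")) := by
  induction vs with
  | nil => simp [HG]
  | cons v vs ih =>
    obtain ⟨h1, h2, h3, h4⟩ := hit_al8 (pyGetRsid v)
    obtain ⟨i1, i2, i3, i4⟩ := ih
    simp only [HG, List.flatMap_cons, List.countP_append, List.length_append,
      List.countP_cons, beq_iff_eq] at *
    refine ⟨?_, ?_, ?_, ?_⟩
    · first
      | (rw [h1, i1]; split_ifs <;> omega)
      | (rw [h1, i1]; omega)
      | rw [h1, i1]
    · first
      | (rw [h2, i2]; split_ifs <;> omega)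
      | (rw [h2, i2]; omega)
      | rw [h2, i2]
    · first
      | (rw [h3, i3]; split_ifs <;> omega)
      | (rw [h3, i3]; omega)
      | rw [h3, i3]
    · first
      | (rw [h4, i4]; split_ifs <;> omega)
      | (rw [h4, i4]; omega)
      | rw [h4, i4]

theorem genF_al1 (vs : List (List (String × String))) :
    aStat "Normal Metabolizer" false (HG al1 vs) =
    bStat false (cV vs "rs3892097" + cV vs "rs35742686" + cV vs "rs5030655") (cV vs "rs3892097" + cV vs "rs35742686" + cV vs "rs5030655") (0) (0) := by
  obtain ⟨hN, hD, hI, hT⟩ := H_al1 vs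
  simp only [aStat, bStat, List.isEmpty_iff, ← List.length_eq_zero_iff, hT, hN, hD, hI,
    cV_eq vs "rs3892097", cV_eq vs "rs35742686", cV_eq vs "rs5030655",
    Bool.false_and, Bool.true_and, bne_iff_ne, Nat.cast_add, Nat.cast_ofNat, Nat.cast_zero]
  split_ifs <;> first | rfl | (exfalso; omega) | (exfalso; assumption) | omega

theorem genF_al2 (vs : List (List (String × String))) :
    aStat "Normal Metabolizer" false (HG al2 vs) =
    bStat false (cV vs "rs4244285" + cV vs "rs4986893" + cV vs "rs12248560") (cV vs "rs4244285" + cV vs "rs4986893") (0) (cV vs "rs12248560") := by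
  obtain ⟨hN, hD, hI, hT⟩ := H_al2 vs
  simp only [aStat, bStat, List.isEmpty_iff, ← List.length_eq_zero_iff, hT, hN, hD, hI,
    cV_eq vs "rs4244285", cV_eq vs "rs4986893", cV_eq vs "rs12248560",
    Bool.false_and, Bool.true_and, bne_iff_ne, Nat.cast_add, Nat.cast_ofNat, Nat.cast_zero]
  split_ifs <;> first | rfl | (exfalso; omega) | (exfalso; assumption) | omega

theorem genF_al3 (vs : List (List (String × String))) :
    aStat "Normal Metabolizer" false (HG al3 vs) =
    bStat false (cV vs "rs1799853" + cV vs "rs1057910") (cV vs "rs1057910") (cV vs "rs1799853") (0) := by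
  obtain ⟨hN, hD, hI, hT⟩ := H_al3 vs
  simp only [aStat, bStat, List.isEmpty_iff, ← List.length_eq_zero_iff, hT, hN, hD, hI,
    cV_eq vs "rs1799853", cV_eq vs "rs1057910",
    Bool.false_and, Bool.true_and, bne_iff_ne, Nat.cast_add, Nat.cast_ofNat, Nat.cast_zero]
  split_ifs <;> first | rfl | (exfalso; omega) | (exfalso; assumption) | omega

theorem genF_al4 (vs : List (List (String × String))) :
    aStat "Normal Metabolizer" false (HG al4 vs) =
    bStat false (cV vs "rs3918290" + cV vs "rs67376798") (cV vs "rs3918290") (cV vs "rs67376798") (0) := by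
  obtain ⟨hN, hD, hI, hT⟩ := H_al4 vs
  simp only [aStat, bStat, List.isEmpty_iff, ← List.length_eq_zero_iff, hT, hN, hD, hI,
    cV_eq vs "rs3918290", cV_eq vs "rs67376798",
    Bool.false_and, Bool.true_and, bne_iff_ne, Nat.cast_add, Nat.cast_ofNat, Nat.cast_zero]
  split_ifs <;> first | rfl | (exfalso; omega) | (exfalso; assumption) | omega

theorem genF_al5 (vs : List (List (String × String))) :
    aStat "Normal Metabolizer" false (HG al5 vs) =
    bStat false (cV vs "rs4149056") (0) (cV vs "rs4149056") (0) := by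
  obtain ⟨hN, hD, hI, hT⟩ := H_al5 vs
  simp only [aStat, bStat, List.isEmpty_iff, ← List.length_eq_zero_iff, hT, hN, hD, hI,
    cV_eq vs "rs4149056",
    Bool.false_and, Bool.true_and, bne_iff_ne, Nat.cast_add, Nat.cast_ofNat, Nat.cast_zero]
  split_ifs <;> first | rfl | (exfalso; omega) | (exfalso; assumption) | omega

theorem genF_al6 (vs : List (List (String × String))) :
    aStat "Normal Metabolizer" false (HG al6 vs) =
    bStat false (cV vs "rs9923231") (0) (0) (0) := by
  obtain ⟨hN, hD, hI, hT⟩ := H_al6 vs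
  simp only [aStat, bStat, List.isEmpty_iff, ← List.length_eq_zero_iff, hT, hN, hD, hI,
    cV_eq vs "rs9923231",
    Bool.false_and, Bool.true_and, bne_iff_ne, Nat.cast_add, Nat.cast_ofNat, Nat.cast_zero]
  split_ifs <;> first | rfl | (exfalso; omega) | (exfalso; assumption) | omega

theorem genF_al7 (vs : List (List (String × String))) :
    aStat "Normal Metabolizer" false (HG al7 vs) =
    bStat false (cV vs "rs3064744") (0) (cV vs "rs3064744") (0) := by
  obtain ⟨hN, hD, hI, hT⟩ := H_al7 vs
  simp only [aStat, bStat, List.isEmpty_iff, ← List.length_eq_zero_iff, hT, hN, hD, hI,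
    cV_eq vs "rs3064744",
    Bool.false_and, Bool.true_and, bne_iff_ne, Nat.cast_add, Nat.cast_ofNat, Nat.cast_zero]
  split_ifs <;> first | rfl | (exfalso; omega) | (exfalso; assumption) | omega

theorem genF_al8 (vs : List (List (String × String))) :
    aStat "Normal Metabolizer" true (HG al8 vs) =
    bStat true (cV vs "rs2395029") (0) (0) (0) := by
  obtain ⟨hN, hD, hI, hT⟩ := H_al8 vs
  simp only [aStat, bStat, List.isEmpty_iff, ← List.length_eq_zero_iff, hT, hN, hD, hI,
    cV_eq vs "rs2395029",
    Bool.false_and, Bool.true_and, bne_iff_ne, Nat.cast_add, Nat.cast_ofNat, Nat.cast_zero]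
  split_ifs <;> first | rfl | (exfalso; omega) | (exfalso; assumption) | omega

def BOut (vs : List (List (String × String))) : List (String × String) :=
  [("CYP2D6", bStat false (cV vs "rs3892097" + cV vs "rs35742686" + cV vs "rs5030655") (cV vs "rs3892097" + cV vs "rs35742686" + cV vs "rs5030655") (0) (0)),
   ("CYP2C19", bStat false (cV vs "rs4244285" + cV vs "rs4986893" + cV vs "rs12248560") (cV vs "rs4244285" + cV vs "rs4986893") (0) (cV vs "rs12248560")),
   ("CYP2C9", bStat false (cV vs "rs1799853" + cV vs "rs1057910") (cV vs "rs1057910") (cV vs "rs1799853") (0)),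
   ("DPYD", bStat false (cV vs "rs3918290" + cV vs "rs67376798") (cV vs "rs3918290") (cV vs "rs67376798") (0)),
   ("SLCO1B1", bStat false (cV vs "rs4149056") (0) (cV vs "rs4149056") (0)),
   ("VKORC1", bStat false (cV vs "rs9923231") (0) (0) (0)),
   ("UGT1A1", bStat false (cV vs "rs3064744") (0) (cV vs "rs3064744") (0)),
   ("HLA-B", bStat true (cV vs "rs2395029") (0) (0) (0)),
   ("CYP3A4", bStat false 0 0 0 0),
   ("CYP3A5", bStat false 0 0 0 0),
   ("TPMT", bStat false 0 0 0 0),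
   ("NUDT15", bStat false 0 0 0 0),
   ("G6PD", bStat false 0 0 0 0)]

theorem B_eq (vs : List (List (String × String))) :
    determine_metabolizer_status_alt vs = BOut vs := by
  simp [determine_metabolizer_status_alt, star_eq, bTally, BOut, bStat, cV, countsOf,
    al1, al2, al3, al4, al5, al6, al7, al8, aAllele,
    PySem.Dict.insert, PySem.Dict.contains, PySem.Dict.getD, PySem.Dict.get?, PySem.Dict.empty]


-- ===== VERDICT (by name: the statement is the Claim_ definition above) =====
theorem determine_metabolizer_status_spec : Claim_equal_determine_metabolizer_status := by
  unfold Claim_equal_determine_metabolizer_status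
  intro vs _
  unfold Spec_determine_metabolizer_status
  rw [A_eq, B_eq]
  simp only [AOut, BOut, genF_al1 vs, genF_al2 vs, genF_al3 vs, genF_al4 vs, genF_al5 vs,
    genF_al6 vs, genF_al7 vs, genF_al8 vs]
  simp [bStat]
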